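-- pv_equiv track=rewrite | github.com/RaulRinconX/Introduccion-a-la-Programacion | PROYECTO 3/proyecto/cupicoin.py | calcular_el_hash
-- ===== SOURCE A (Python) =====
-- def hashh (SumaASCII: int, timestamp: int) -> int:
--  return SumaASCII % timestamp
--
-- def calcular_el_hash(bloque_temporal, timestamp):
--     sumaASCII = ""
--     for a in bloque_temporal:
--         a=[str(x) for x in a]
--         sumaASCII += "".join(a)
--
--     valor = 0
--     for x in range(len(sumaASCII)):
--         valor += ord(sumaASCII[x])
--
--     return hashh(valor, timestamp)
-- ===== SOURCE B (Python) =====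
-- def calcular_el_hash(bloque_temporal, timestamp):
--     # Arithmetic digit extraction: never builds any string.
--     # ASCII of str(x): 45 for a leading '-', 48 + d for each decimal digit d.
--     valor = 0
--     for a in bloque_temporal:
--         for x in a:
--             if x < 0:
--                 valor += 45
--                 x = -x
--             if x == 0:
--                 valor += 48
--             else:
--                 while x:
--                     valor += 48 + x % 10
--                     x //= 10
--     return valor % timestamp
-- ===== Notes on version B (the rewrite author's own statement) =====
-- stated objective: alternative
-- what changed: B computes each integer's ASCII contribution purely arithmetically (45 for the sign, 48+digit via a divmod loop), never calling str() or building/scanned any string, while A concatenates all stringified numbers and rescans the string by index.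
import Mathlib
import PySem

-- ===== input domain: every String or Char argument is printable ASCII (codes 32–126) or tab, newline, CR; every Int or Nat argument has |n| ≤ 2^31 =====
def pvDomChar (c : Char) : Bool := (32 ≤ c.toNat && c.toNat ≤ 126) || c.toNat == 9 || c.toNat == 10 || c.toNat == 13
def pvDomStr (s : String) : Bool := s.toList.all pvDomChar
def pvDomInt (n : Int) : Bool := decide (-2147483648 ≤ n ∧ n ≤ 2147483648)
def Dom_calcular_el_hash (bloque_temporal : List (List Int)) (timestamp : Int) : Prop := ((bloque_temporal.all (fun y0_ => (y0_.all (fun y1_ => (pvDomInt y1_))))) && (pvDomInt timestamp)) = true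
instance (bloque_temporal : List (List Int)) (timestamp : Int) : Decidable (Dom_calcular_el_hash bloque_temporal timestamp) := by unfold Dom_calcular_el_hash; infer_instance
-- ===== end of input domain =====

-- B replaces A's stringify-concatenate-rescan with pure arithmetic digit extraction
-- (45 for '-', 48 + d per decimal digit via a divmod loop); no string is ever built (objective: alternative).
-- Pre_ excludes timestamp = 0, on which Python A raises ZeroDivisionError.


-- ===== PORT A =====
def hashh (sumaASCII : Int) (timestamp : Int) : Int :=
  PySem.Int.mod sumaASCII timestamp

def calcular_el_hash (bloque_temporal : List (List Int)) (timestamp : Int) : Int :=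
  -- sumaASCII accumulated as a List Char (PySem string model)
  let sumaASCII : List Char :=
    bloque_temporal.foldl
      (fun s a => s ++ PySem.Chars.join [] (a.map (fun x => PySem.Int.toChars x))) []
  let valor : Int :=
    (PySem.List.pyRange 0 (sumaASCII.length : Int) 1).foldl
      (fun v x => v + ((PySem.List.pyGetD sumaASCII x ' ').toNat : Int)) 0
  hashh valor timestamp

-- ===== PORT B =====
-- the `while x: valor += 48 + x % 10; x //= 10` loop of Source B (x ≥ 0 there, so Nat is exact)
def digitLoop (x : Nat) (valor : Int) : Int :=
  if h : x = 0 then valor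
  else digitLoop (x / 10) (valor + 48 + ((x % 10 : Nat) : Int))
  termination_by x
  decreasing_by exact Nat.div_lt_self (Nat.pos_of_ne_zero h) (by norm_num)

def calcular_el_hash_alt (bloque_temporal : List (List Int)) (timestamp : Int) : Int :=
  let valor : Int :=
    bloque_temporal.foldl (fun v a =>
      a.foldl (fun v x =>
        let vx : Int × Int := if x < 0 then (v + 45, -x) else (v, x)
        if vx.2 = 0 then vx.1 + 48 else digitLoop vx.2.toNat vx.1) v) 0
  PySem.Int.mod valor timestamp

-- ===== PRECONDITION & SPEC =====
-- Pre_ excludes timestamp = 0, where Python A raises ZeroDivisionError.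
def Pre_calcular_el_hash (_bloque_temporal : List (List Int)) (timestamp : Int) : Prop := timestamp ≠ 0
instance (bloque_temporal : List (List Int)) (timestamp : Int) : Decidable (Pre_calcular_el_hash bloque_temporal timestamp) := by unfold Pre_calcular_el_hash; infer_instance
def pvWitness_calcular_el_hash : List (List Int) × Int := ([[1, 23], [-4]], 7)

def Spec_calcular_el_hash (bloque_temporal : List (List Int)) (timestamp : Int) (out : Int) : Prop := out = calcular_el_hash_alt bloque_temporal timestamp
instance (bloque_temporal : List (List Int)) (timestamp : Int) (out : Int) : Decidable (Spec_calcular_el_hash bloque_temporal timestamp out) := by unfold Spec_calcular_el_hash; infer_instance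

-- ===== CLAIM (what is proved, stated in full; the proofs are below) =====
def Claim_equal_calcular_el_hash : Prop := ∀ (bloque_temporal : List (List Int)) (timestamp : Int), Dom_calcular_el_hash bloque_temporal timestamp → Pre_calcular_el_hash bloque_temporal timestamp → Spec_calcular_el_hash bloque_temporal timestamp (calcular_el_hash bloque_temporal timestamp)

-- ===== LEMMAS AND PROOFS =====

-- ASCII sum of a character list
def sumCodes (cs : List Char) : Int := (cs.map (fun c => (c.toNat : Int))).sum

theorem digitChar_toNat (d : Nat) (h : d < 10) : (Nat.digitChar d).toNat = 48 + d := by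
  interval_cases d <;> decide

theorem digitLoop_acc (n : Nat) : ∀ v : Int, digitLoop n v = v + digitLoop n 0 := by
  induction n using Nat.strong_induction_on with
  | _ n ih =>
    intro v
    by_cases h : n = 0
    · simp [digitLoop, h]
    · have hlt : n / 10 < n := Nat.div_lt_self (Nat.pos_of_ne_zero h) (by norm_num)
      conv_lhs => rw [digitLoop]
      conv_rhs => rw [digitLoop]
      simp only [dif_neg h]
      rw [ih (n / 10) hlt (v + 48 + ((n % 10 : Nat) : Int)),
          ih (n / 10) hlt (0 + 48 + ((n % 10 : Nat) : Int))]
      ring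

theorem sumCodes_toDigitsCore :
    ∀ (fuel n : Nat) (ds : List Char), n < 10 ^ fuel → 0 < fuel →
      sumCodes (Nat.toDigitsCore 10 fuel n ds)
        = 48 + ((n % 10 : Nat) : Int) + digitLoop (n / 10) 0 + sumCodes ds := by
  intro fuel
  induction fuel with
  | zero => intro n ds _ h; omega
  | succ f ih =>
    intro n ds hlt _
    rw [Nat.toDigitsCore]
    by_cases h : n / 10 = 0
    · simp only [h, if_true]
      rw [digitLoop]
      simp only [dite_eq_ite, if_true]
      simp [sumCodes, digitChar_toNat (n % 10) (Nat.mod_lt _ (by norm_num))]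
    · simp only [h, if_false]
      have hf : 0 < f := by
        by_contra hf
        have hf0 : f = 0 := by omega
        subst hf0
        simp at hlt
        omega
      have hdiv : n / 10 < 10 ^ f := by
        have hp : (10 : Nat) ^ (f + 1) = 10 ^ f * 10 := pow_succ 10 f
        omega
      rw [ih (n / 10) _ hdiv hf]
      have hsum : sumCodes (Nat.digitChar (n % 10) :: ds)
          = 48 + ((n % 10 : Nat) : Int) + sumCodes ds := by
        simp [sumCodes, digitChar_toNat (n % 10) (Nat.mod_lt _ (by norm_num))]
      rw [hsum]
      conv_rhs => rw [digitLoop]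
      simp only [dif_neg h]
      rw [digitLoop_acc (n / 10 / 10) (0 + 48 + ((n / 10 % 10 : Nat) : Int))]
      ring

theorem sumCodes_toDigits (n : Nat) :
    sumCodes (Nat.toDigits 10 n) = 48 + ((n % 10 : Nat) : Int) + digitLoop (n / 10) 0 := by
  rw [Nat.toDigits]
  have hp : n < 10 ^ (n + 1) := by
    have h1 : n < 10 ^ n := Nat.lt_pow_self (by norm_num)
    have h2 : 10 ^ n ≤ 10 ^ (n + 1) := Nat.pow_le_pow_right (by norm_num) (by omega)
    omega
  rw [sumCodes_toDigitsCore (n + 1) n [] hp (by omega)]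
  simp [sumCodes]

theorem digitLoop_pos (n : Nat) (h : n ≠ 0) :
    digitLoop n 0 = 48 + ((n % 10 : Nat) : Int) + digitLoop (n / 10) 0 := by
  rw [digitLoop]
  simp only [h, dite_false]
  rw [digitLoop_acc (n / 10)]
  ring

-- per-element: B's inner body adds exactly the ASCII sum of str(x)
theorem inner_body_eq (v : Int) (x : Int) :
    (let vx : Int × Int := if x < 0 then (v + 45, -x) else (v, x)
     if vx.2 = 0 then vx.1 + 48 else digitLoop vx.2.toNat vx.1)
    = v + sumCodes (PySem.Int.toChars x) := by
  rcases lt_trichotomy x 0 with hneg | hz | hpos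
  · have hx0 : ¬ (-x = 0) := by omega
    simp only [if_pos hneg, hx0, if_false]
    rw [digitLoop_acc]
    have habs : (-x).toNat = x.natAbs := by omega
    rw [habs, PySem.Int.toChars, if_pos hneg]
    have hne : x.natAbs ≠ 0 := by omega
    rw [show sumCodes ('-' :: Nat.toDigits 10 x.natAbs)
          = 45 + sumCodes (Nat.toDigits 10 x.natAbs) by simp [sumCodes]]
    rw [sumCodes_toDigits, digitLoop_pos x.natAbs hne]
    ring
  · subst hz
    simp [PySem.Int.toChars, Nat.toDigits, Nat.toDigitsCore, sumCodes]
    decide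
  · have h1 : ¬ x < 0 := by omega
    have h2 : ¬ (x = 0) := by omega
    simp only [if_neg h1, h2, if_false]
    rw [digitLoop_acc]
    rw [PySem.Int.toChars, if_neg h1, sumCodes_toDigits]
    have hne : x.toNat ≠ 0 := by omega
    rw [digitLoop_pos x.toNat hne]

-- "".join of a list of strings with empty separator is flatMap
theorem join_nil_eq_flatMap (f : Int → List Char) :
    ∀ a : List Int, PySem.Chars.join [] (a.map f) = a.flatMap f := by
  intro a
  induction a with
  | nil => rfl
  | cons x xs ih =>
    cases xs with
    | nil => simp [PySem.Chars.join_singleton, List.flatMap]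
    | cons y ys =>
      simp only [List.map_cons, PySem.Chars.join_cons_cons] at *
      simp [List.flatMap_cons] at *
      simpa using ih

-- B's nested foldl equals the ASCII sum of the flattened stringification
theorem alt_valor_eq (bt : List (List Int)) :
    bt.foldl (fun v a =>
      a.foldl (fun v x =>
        let vx : Int × Int := if x < 0 then (v + 45, -x) else (v, x)
        if vx.2 = 0 then vx.1 + 48 else digitLoop vx.2.toNat vx.1) v) 0
    = ((bt.flatMap (fun a => a.flatMap (fun x => PySem.Int.toChars x))).map
        (fun c => (c.toNat : Int))).sum := by
  have hinner : ∀ (a : List Int) (v : Int),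
      a.foldl (fun v x =>
        let vx : Int × Int := if x < 0 then (v + 45, -x) else (v, x)
        if vx.2 = 0 then vx.1 + 48 else digitLoop vx.2.toNat vx.1) v
      = v + sumCodes (a.flatMap (fun x => PySem.Int.toChars x)) := by
    intro a
    induction a with
    | nil => intro v; simp [sumCodes]
    | cons x xs ih =>
      intro v
      simp only [List.foldl_cons, List.flatMap_cons]
      rw [inner_body_eq, ih]
      simp [sumCodes]
      ring
  have : ∀ v : Int,
      bt.foldl (fun v a =>
        a.foldl (fun v x =>
          let vx : Int × Int := if x < 0 then (v + 45, -x) else (v, x)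
          if vx.2 = 0 then vx.1 + 48 else digitLoop vx.2.toNat vx.1) v) v
      = v + sumCodes (bt.flatMap (fun a => a.flatMap (fun x => PySem.Int.toChars x))) := by
    induction bt with
    | nil => intro v; simp [sumCodes]
    | cons a as ih =>
      intro v
      simp only [List.foldl_cons, List.flatMap_cons]
      rw [hinner, ih]
      simp [sumCodes]
      ring
  simpa [sumCodes] using this 0

-- A's second loop (indexing over the whole string) is the ASCII sum of that string
theorem foldl_pyGetD_sum (L : List Char) :
    (PySem.List.pyRange 0 (L.length : Int) 1).foldl
      (fun v x => v + ((PySem.List.pyGetD L x ' ').toNat : Int)) 0 = sumCodes L := by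
  rw [PySem.List.foldl_add]
  rw [show (fun x => ((PySem.List.pyGetD L x ' ').toNat : Int))
        = (fun c : Char => (c.toNat : Int)) ∘ (fun x => PySem.List.pyGetD L x ' ') from rfl,
      ← List.map_map, PySem.List.map_pyGetD_pyRange_zero']
  simp [sumCodes]

-- ===== VERDICT (by name: the statement is the Claim_ definition above) =====
theorem calcular_el_hash_spec : Claim_equal_calcular_el_hash := by
  intro bt ts _ _
  unfold Spec_calcular_el_hash calcular_el_hash calcular_el_hash_alt hashh
  simp only [foldl_pyGetD_sum, alt_valor_eq]
  congr 1
  rw [PySem.List.foldl_append_eq_flatMap]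
  simp only [List.nil_append, sumCodes]
  congr 1
  congr 1
  apply List.flatMap_congr
  intro a _
  exact join_nil_eq_flatMap PySem.Int.toChars a
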